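-- pv_equiv track=rewrite | github.com/kunigami/programming-contests | advent-of-code/2024/puzzle-21/solve.py | search_paths_rec
-- ===== SOURCE A (Python) =====
-- dirs = {
--     'v': (1, 0),
--     '>': (0, 1),
--     '^': (-1, 0),
--     '<': (0, -1)
-- }
--
-- def search_for_symbol(sc, ec, symbol, excluded_state) -> list[str]:
--     delta = dirs[symbol]
--     new_sc = (sc[0] + delta[0], sc[1] + delta[1])
--     paths = search_paths_rec(new_sc, ec, excluded_state)
--     return [symbol + p for p in paths]
--
-- def search_paths_rec(sc, ec, excluded_state) -> list[str]:
--     if sc == excluded_state: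
--         return []
--
--     if sc == ec:
--         return ['A']
--
--     symbols = []
--     if sc[0] < ec[0]:
--         symbols.append('v')
--     if sc[1] < ec[1]:
--         symbols.append('>')
--     if sc[0] > ec[0]:
--         symbols.append('^')
--     if sc[1] > ec[1]:
--         symbols.append('<')
--
--     new_paths: list[str] = []
--     for symbol in symbols:
--         new_paths += search_for_symbol(sc, ec, symbol, excluded_state)
--     return new_paths
-- ===== SOURCE B (Python) =====
-- dirs = {
--     'v': (1, 0),
--     '>': (0, 1),
--     '^': (-1, 0),
--     '<': (0, -1)
-- }
--
-- def _interleavings(f, nf, s, ns):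
--     # all strings with nf copies of f and ns copies of s, f-first (lexicographic) order
--     if nf == 0:
--         return [s * ns]
--     if ns == 0:
--         return [f * nf]
--     return [f + p for p in _interleavings(f, nf - 1, s, ns)] + \
--            [s + p for p in _interleavings(f, nf, s, ns - 1)]
--
-- def _survives(sc, path, excluded_state):
--     r, c = sc
--     for ch in path:
--         dr, dc = dirs[ch]
--         r += dr
--         c += dc
--         if (r, c) == excluded_state:
--             return False
--     return True
--
-- def search_paths_rec(sc, ec, excluded_state):
--     if sc == excluded_state:
--         return []
--     dv = ec[0] - sc[0]
--     dh = ec[1] - sc[1]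
--     if dv == 0 and dh == 0:
--         return ['A']
--     # pick the two step symbols; `f` is the one the DFS priority tries first
--     if dv > 0:
--         f, nf, s, ns = 'v', dv, ('>' if dh > 0 else '<'), abs(dh)
--     elif dh > 0:
--         f, nf, s, ns = '>', dh, '^', -dv
--     else:
--         f, nf, s, ns = '^', -dv, '<', -dh
--     return [p + 'A'
--             for p in _interleavings(f, nf, s, ns)
--             if _survives(sc, p, excluded_state)]
-- ===== Notes on version B (the rewrite author's own statement) =====
-- stated objective: alternative
-- what changed: Replaces the pruned DFS over grid cells by a closed-form decomposition: compute the vertical/horizontal step symbols and counts from the coordinate deltas, enumerate all interleavings of the two symbols in the DFS priority order, then filter each candidate path by one walk that checks the excluded cell; enumeration and exclusion are separated instead of interwoven per cell. Pre_ excludes inputs whose grid distance |dv|+|dh| exceeds the interpreter's recursion budget (cutoff 4900, just under the ~4997-step RecursionError threshold), on which A raises RecursionError.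
import Mathlib
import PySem

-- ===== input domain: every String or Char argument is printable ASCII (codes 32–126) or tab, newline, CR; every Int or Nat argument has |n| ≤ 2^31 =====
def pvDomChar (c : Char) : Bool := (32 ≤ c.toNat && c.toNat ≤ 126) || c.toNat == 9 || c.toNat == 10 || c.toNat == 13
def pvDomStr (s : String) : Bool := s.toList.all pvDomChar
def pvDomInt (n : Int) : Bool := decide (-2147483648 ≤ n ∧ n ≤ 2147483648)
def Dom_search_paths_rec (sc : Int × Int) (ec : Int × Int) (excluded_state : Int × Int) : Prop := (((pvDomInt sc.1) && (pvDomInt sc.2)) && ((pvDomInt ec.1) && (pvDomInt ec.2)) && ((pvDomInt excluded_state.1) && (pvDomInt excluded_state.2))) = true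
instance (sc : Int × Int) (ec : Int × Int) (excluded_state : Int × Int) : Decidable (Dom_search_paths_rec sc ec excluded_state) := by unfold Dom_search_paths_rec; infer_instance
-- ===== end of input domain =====

-- B replaces A's pruned DFS over grid cells by closed-form symbol/count selection,
-- enumeration of all interleavings in DFS priority order, and a per-path exclusion walk
-- (objective: alternative decomposition of the same cost).

-- ===== PORT A =====
-- A's `search_for_symbol` is inlined at each of the four symbol branches; the loop
-- `for symbol in symbols: new_paths += …` over the conditionally built symbol list is
-- unrolled into the four conditional appends in the same v, >, ^, < order.
def search_paths_rec (sc : Int × Int) (ec : Int × Int) (excluded_state : Int × Int) : List String :=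
  if sc = excluded_state then []
  else if sc = ec then ["A"]
  else
    (if h : sc.1 < ec.1 then
      (search_paths_rec (sc.1 + 1, sc.2) ec excluded_state).map (fun p => String.ofList ('v' :: p.toList))
     else []) ++
    (if h : sc.2 < ec.2 then
      (search_paths_rec (sc.1, sc.2 + 1) ec excluded_state).map (fun p => String.ofList ('>' :: p.toList))
     else []) ++
    (if h : sc.1 > ec.1 then
      (search_paths_rec (sc.1 - 1, sc.2) ec excluded_state).map (fun p => String.ofList ('^' :: p.toList))
     else []) ++
    (if h : sc.2 > ec.2 then
      (search_paths_rec (sc.1, sc.2 - 1) ec excluded_state).map (fun p => String.ofList ('<' :: p.toList))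
     else [])
termination_by (ec.1 - sc.1).natAbs + (ec.2 - sc.2).natAbs
decreasing_by all_goals omega

-- ===== PORT B =====
-- dirs lookup of Source B
def pvDelta (c : Char) : Int × Int :=
  if c = 'v' then (1, 0) else if c = '>' then (0, 1) else if c = '^' then (-1, 0) else (0, -1)

-- _interleavings of Source B
def pvInter (f : Char) (nf : Nat) (s : Char) (ns : Nat) : List (List Char) :=
  match nf, ns with
  | 0, ns => [List.replicate ns s]
  | nf, 0 => [List.replicate nf f]
  | nf + 1, ns + 1 =>
      ((pvInter f nf s (ns + 1)).map (fun p => f :: p)) ++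
      ((pvInter f (nf + 1) s ns).map (fun p => s :: p))

-- _survives of Source B
def pvSurvives (sc : Int × Int) (path : List Char) (excluded_state : Int × Int) : Bool :=
  match path with
  | [] => true
  | c :: rest =>
    let d := pvDelta c
    let p := (sc.1 + d.1, sc.2 + d.2)
    if p = excluded_state then false else pvSurvives p rest excluded_state

-- the if/elif/else selecting (f, nf, s, ns) in Source B (counts there are the nonnegative
-- ints dv, abs(dh), -dv, …; natAbs is exactly those values under each branch's sign facts)
def pvChoose (dv dh : Int) : Char × Nat × Char × Nat :=
  if 0 < dv then ('v', dv.natAbs, if 0 < dh then '>' else '<', dh.natAbs)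
  else if 0 < dh then ('>', dh.natAbs, '^', dv.natAbs)
  else ('^', dv.natAbs, '<', dh.natAbs)

def search_paths_rec_alt (sc : Int × Int) (ec : Int × Int) (excluded_state : Int × Int) : List String :=
  if sc = excluded_state then []
  else
    let dv := ec.1 - sc.1
    let dh := ec.2 - sc.2
    if dv = 0 ∧ dh = 0 then ["A"]
    else
      match pvChoose dv dh with
      | (f, nf, s, ns) =>
        ((pvInter f nf s ns).filter (fun p => pvSurvives sc p excluded_state)).map
          (fun p => String.ofList (p ++ ['A']))

-- ===== PRECONDITION & SPEC =====
-- Pre_ excludes exactly the inputs on which A raises: when the grid distance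
-- |dv| + |dh| exceeds the interpreter's recursion budget (about 4997 steps under a
-- recursion limit of 10000), A's cell-by-cell recursion raises RecursionError; the
-- cutoff 4900 sits just under that interpreter-dependent threshold.
def Pre_search_paths_rec (sc : Int × Int) (ec : Int × Int) (excluded_state : Int × Int) : Prop :=
  (ec.1 - sc.1).natAbs + (ec.2 - sc.2).natAbs ≤ 4900
instance (sc : Int × Int) (ec : Int × Int) (excluded_state : Int × Int) : Decidable (Pre_search_paths_rec sc ec excluded_state) := by unfold Pre_search_paths_rec; infer_instance
def pvWitness_search_paths_rec : (Int × Int) × (Int × Int) × (Int × Int) := ((0, 0), (2, 1), (1, 0))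

def Spec_search_paths_rec (sc : Int × Int) (ec : Int × Int) (excluded_state : Int × Int) (out : List String) : Prop := out = search_paths_rec_alt sc ec excluded_state
instance (sc : Int × Int) (ec : Int × Int) (excluded_state : Int × Int) (out : List String) : Decidable (Spec_search_paths_rec sc ec excluded_state out) := by unfold Spec_search_paths_rec; infer_instance

-- ===== CLAIM (what is proved, stated in full; the proofs are below) =====
def Claim_equal_search_paths_rec : Prop := ∀ (sc : Int × Int) (ec : Int × Int) (excluded_state : Int × Int), Dom_search_paths_rec sc ec excluded_state → Pre_search_paths_rec sc ec excluded_state → Spec_search_paths_rec sc ec excluded_state (search_paths_rec sc ec excluded_state)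

-- ===== LEMMAS AND PROOFS =====

-- proof-only abbreviations
def pvGlue (p : List Char) : String := String.ofList (p ++ ['A'])

def pvIchoose (dv dh : Int) : List (List Char) :=
  match pvChoose dv dh with
  | (f, nf, s, ns) => pvInter f nf s ns

lemma pvInter_zero_left (f s : Char) (ns : Nat) : pvInter f 0 s ns = [List.replicate ns s] := by
  cases ns <;> simp [pvInter]

lemma pvInter_zero_right (f s : Char) (nf : Nat) : pvInter f nf s 0 = [List.replicate nf f] := by
  cases nf <;> simp [pvInter]

-- one-step split of the interleaving enumeration, all count shapes at once
lemma pvInter_split (f s : Char) (a b : Nat) :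
    pvInter f a s b =
      (if a ≠ 0 then ((pvInter f (a - 1) s b).map (fun p => f :: p)) else []) ++
      (if b ≠ 0 then ((pvInter f a s (b - 1)).map (fun p => s :: p)) else []) ++
      (if a = 0 ∧ b = 0 then [[]] else []) := by
  match a, b with
  | 0, 0 => simp [pvInter]
  | 0, b + 1 => simp [pvInter_zero_left, List.replicate_succ]
  | a + 1, 0 => simp [pvInter_zero_right, List.replicate_succ]
  | a + 1, b + 1 => simp [pvInter]

-- filtering a `c ::`-mapped family: either the first step dies, or the filter pushes inside
lemma pvFilter_surv_map (sc excluded_state : Int × Int) (c : Char) (L : List (List Char)) :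
    (L.map (fun p => c :: p)).filter (fun p => pvSurvives sc p excluded_state) =
      (if (sc.1 + (pvDelta c).1, sc.2 + (pvDelta c).2) = excluded_state then []
       else ((L.filter (fun p => pvSurvives (sc.1 + (pvDelta c).1, sc.2 + (pvDelta c).2) p excluded_state)).map (fun p => c :: p))) := by
  rw [List.filter_map]
  by_cases h : (sc.1 + (pvDelta c).1, sc.2 + (pvDelta c).2) = excluded_state
  · simp [h, pvSurvives, Function.comp_def]
  · simp [h, pvSurvives, Function.comp_def]

-- quadrant characterisations of the selected enumeration
lemma pvIchoose_pp (dv dh : Int) (h1 : 0 ≤ dv) (h2 : 0 ≤ dh) :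
    pvIchoose dv dh = pvInter 'v' dv.natAbs '>' dh.natAbs := by
  unfold pvIchoose pvChoose
  split_ifs with h1' h2' h2'
  · rfl
  · have hb : dh.natAbs = 0 := by omega
    simp [hb, pvInter_zero_right]
  · have ha : dv.natAbs = 0 := by omega
    simp [ha, pvInter_zero_left, pvInter_zero_right]
  · have ha : dv.natAbs = 0 := by omega
    have hb : dh.natAbs = 0 := by omega
    simp [ha, hb, pvInter_zero_left]
lemma pvIchoose_pm (dv dh : Int) (h1 : 0 ≤ dv) (h2 : dh ≤ 0) :
    pvIchoose dv dh = pvInter 'v' dv.natAbs '<' dh.natAbs := by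
  unfold pvIchoose pvChoose
  split_ifs with h1' h2' h2'
  · exact absurd h2' (by omega)
  · rfl
  · exact absurd h2' (by omega)
  · have ha : dv.natAbs = 0 := by omega
    simp [ha, pvInter_zero_left]
lemma pvIchoose_mp (dv dh : Int) (h1 : dv ≤ 0) (h2 : 0 ≤ dh) :
    pvIchoose dv dh = pvInter '>' dh.natAbs '^' dv.natAbs := by
  unfold pvIchoose pvChoose
  split_ifs with h1' h2' h2'
  · exact absurd h1' (by omega)
  · exact absurd h1' (by omega)
  · rfl
  · have hb : dh.natAbs = 0 := by omega
    simp [hb, pvInter_zero_left, pvInter_zero_right]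
lemma pvIchoose_mm (dv dh : Int) (h1 : dv ≤ 0) (h2 : dh ≤ 0) :
    pvIchoose dv dh = pvInter '^' dv.natAbs '<' dh.natAbs := by
  unfold pvIchoose pvChoose
  split_ifs with h1' h2' h2'
  · exact absurd h1' (by omega)
  · exact absurd h1' (by omega)
  · exact absurd h2' (by omega)
  · rfl

-- B in closed form
lemma alt_unfold (sc ec excluded_state : Int × Int) (hne : sc ≠ excluded_state) :
    search_paths_rec_alt sc ec excluded_state =
      ((pvIchoose (ec.1 - sc.1) (ec.2 - sc.2)).filter (fun p => pvSurvives sc p excluded_state)).map pvGlue := by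
  unfold search_paths_rec_alt pvIchoose pvGlue
  rw [if_neg hne]
  by_cases h0 : ec.1 - sc.1 = 0 ∧ ec.2 - sc.2 = 0
  · rw [if_pos h0, h0.1, h0.2]
    simp [pvChoose, pvInter, pvSurvives]
  · rw [if_neg h0]

lemma alt_excluded (sc ec excluded_state : Int × Int) (h : sc = excluded_state) :
    search_paths_rec_alt sc ec excluded_state = [] := by
  simp [search_paths_rec_alt, h]

lemma pvDelta_v : pvDelta 'v' = (1, 0) := rfl
lemma pvDelta_gt : pvDelta '>' = (0, 1) := rfl
lemma pvDelta_up : pvDelta '^' = (-1, 0) := rfl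
lemma pvDelta_lt : pvDelta '<' = (0, -1) := rfl

-- one child of the DFS against the corresponding filtered sub-enumeration
lemma child_eq (ec excluded_state : Int × Int) (c : Char) (next : Int × Int) (Ic : List (List Char))
    (hA : search_paths_rec next ec excluded_state = search_paths_rec_alt next ec excluded_state)
    (hI : pvIchoose (ec.1 - next.1) (ec.2 - next.2) = Ic) :
    (search_paths_rec next ec excluded_state).map (fun p => String.ofList (c :: p.toList)) =
      (if next = excluded_state then []
       else List.map (fun p => c :: p) (List.filter (fun p => pvSurvives next p excluded_state) Ic)).map pvGlue := by
  by_cases hne : next = excluded_state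
  · rw [if_pos hne, hA, alt_excluded _ _ _ hne]
    rfl
  · rw [if_neg hne, hA, alt_unfold _ _ _ hne, hI, List.map_map, List.map_map]
    apply List.map_congr_left
    intro p _
    simp [pvGlue, String.toList_ofList]

lemma spr_main (ec excluded_state : Int × Int) :
    ∀ (n : Nat) (sc : Int × Int), (ec.1 - sc.1).natAbs + (ec.2 - sc.2).natAbs ≤ n →
      search_paths_rec sc ec excluded_state = search_paths_rec_alt sc ec excluded_state := by
  intro n
  induction n with
  | zero =>
    intro sc hle
    by_cases hex : sc = excluded_state
    · rw [search_paths_rec, if_pos hex, alt_excluded _ _ _ hex]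
    · have hec : sc = ec := Prod.ext (by omega) (by omega)
      subst hec
      rw [search_paths_rec, if_neg hex]
      simp [search_paths_rec_alt, hex]
  | succ n ih =>
    intro sc hle
    by_cases hex : sc = excluded_state
    · rw [search_paths_rec, if_pos hex, alt_excluded _ _ _ hex]
    by_cases hec : sc = ec
    · subst hec
      rw [search_paths_rec, if_neg hex]
      simp [search_paths_rec_alt, hex]
    rw [search_paths_rec, if_neg hex, if_neg hec, alt_unfold _ _ _ hex]
    rcases lt_trichotomy sc.1 ec.1 with hv | hv | hv <;>
      rcases lt_trichotomy sc.2 ec.2 with hh | hh | hh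
    · -- dv > 0, dh > 0
      rw [pvIchoose_pp _ _ (by omega) (by omega), pvInter_split,
        if_pos (show (ec.1 - sc.1).natAbs ≠ 0 by omega),
        if_pos (show (ec.2 - sc.2).natAbs ≠ 0 by omega),
        if_neg (show ¬((ec.1 - sc.1).natAbs = 0 ∧ (ec.2 - sc.2).natAbs = 0) by omega),
        dif_pos (show sc.1 < ec.1 by omega),
        dif_pos (show sc.2 < ec.2 by omega),
        dif_neg (show ¬ sc.1 > ec.1 by omega),
        dif_neg (show ¬ sc.2 > ec.2 by omega)]
      simp only [List.append_nil, List.filter_append, List.map_append]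
      rw [pvFilter_surv_map, pvFilter_surv_map]
      simp only [pvDelta_v, pvDelta_gt, add_zero]
      congr 1
      · exact child_eq ec excluded_state 'v' (sc.1 + 1, sc.2) _ (ih _ (by omega))
          (by rw [pvIchoose_pp _ _ (by omega) (by omega)]; congr 1; omega)
      · exact child_eq ec excluded_state '>' (sc.1, sc.2 + 1) _ (ih _ (by omega))
          (by rw [pvIchoose_pp _ _ (by omega) (by omega)]; congr 1; omega)
    · -- dv > 0, dh = 0
      rw [pvIchoose_pp _ _ (by omega) (by omega), pvInter_split,
        if_pos (show (ec.1 - sc.1).natAbs ≠ 0 by omega),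
        if_neg (show ¬(ec.2 - sc.2).natAbs ≠ 0 by omega),
        if_neg (show ¬((ec.1 - sc.1).natAbs = 0 ∧ (ec.2 - sc.2).natAbs = 0) by omega),
        dif_pos (show sc.1 < ec.1 by omega),
        dif_neg (show ¬ sc.2 < ec.2 by omega),
        dif_neg (show ¬ sc.1 > ec.1 by omega),
        dif_neg (show ¬ sc.2 > ec.2 by omega)]
      simp only [List.append_nil]
      rw [pvFilter_surv_map]
      simp only [pvDelta_v, add_zero]
      exact child_eq ec excluded_state 'v' (sc.1 + 1, sc.2) _ (ih _ (by omega))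
        (by rw [pvIchoose_pp _ _ (by omega) (by omega)]; congr 1; omega)
    · -- dv > 0, dh < 0
      rw [pvIchoose_pm _ _ (by omega) (by omega), pvInter_split,
        if_pos (show (ec.1 - sc.1).natAbs ≠ 0 by omega),
        if_pos (show (ec.2 - sc.2).natAbs ≠ 0 by omega),
        if_neg (show ¬((ec.1 - sc.1).natAbs = 0 ∧ (ec.2 - sc.2).natAbs = 0) by omega),
        dif_pos (show sc.1 < ec.1 by omega),
        dif_neg (show ¬ sc.2 < ec.2 by omega),
        dif_neg (show ¬ sc.1 > ec.1 by omega),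
        dif_pos (show sc.2 > ec.2 by omega)]
      simp only [List.append_nil, List.filter_append, List.map_append]
      rw [pvFilter_surv_map, pvFilter_surv_map]
      simp only [pvDelta_v, pvDelta_lt, add_zero, ← sub_eq_add_neg]
      congr 1
      · exact child_eq ec excluded_state 'v' (sc.1 + 1, sc.2) _ (ih _ (by omega))
          (by rw [pvIchoose_pm _ _ (by omega) (by omega)]; congr 1; omega)
      · exact child_eq ec excluded_state '<' (sc.1, sc.2 - 1) _ (ih _ (by omega))
          (by rw [pvIchoose_pm _ _ (by omega) (by omega)]; congr 1; omega)
    · -- dv = 0, dh > 0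
      rw [pvIchoose_pp _ _ (by omega) (by omega), pvInter_split,
        if_neg (show ¬(ec.1 - sc.1).natAbs ≠ 0 by omega),
        if_pos (show (ec.2 - sc.2).natAbs ≠ 0 by omega),
        if_neg (show ¬((ec.1 - sc.1).natAbs = 0 ∧ (ec.2 - sc.2).natAbs = 0) by omega),
        dif_neg (show ¬ sc.1 < ec.1 by omega),
        dif_pos (show sc.2 < ec.2 by omega),
        dif_neg (show ¬ sc.1 > ec.1 by omega),
        dif_neg (show ¬ sc.2 > ec.2 by omega)]
      simp only [List.append_nil, List.nil_append]
      rw [pvFilter_surv_map]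
      simp only [pvDelta_gt, add_zero]
      exact child_eq ec excluded_state '>' (sc.1, sc.2 + 1) _ (ih _ (by omega))
        (by rw [pvIchoose_pp _ _ (by omega) (by omega)]; congr 1; omega)
    · -- dv = 0, dh = 0: contradicts sc ≠ ec
      exact absurd (Prod.ext hv hh) hec
    · -- dv = 0, dh < 0
      rw [pvIchoose_pm _ _ (by omega) (by omega), pvInter_split,
        if_neg (show ¬(ec.1 - sc.1).natAbs ≠ 0 by omega),
        if_pos (show (ec.2 - sc.2).natAbs ≠ 0 by omega),
        if_neg (show ¬((ec.1 - sc.1).natAbs = 0 ∧ (ec.2 - sc.2).natAbs = 0) by omega),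
        dif_neg (show ¬ sc.1 < ec.1 by omega),
        dif_neg (show ¬ sc.2 < ec.2 by omega),
        dif_neg (show ¬ sc.1 > ec.1 by omega),
        dif_pos (show sc.2 > ec.2 by omega)]
      simp only [List.append_nil, List.nil_append]
      rw [pvFilter_surv_map]
      simp only [pvDelta_lt, add_zero, ← sub_eq_add_neg]
      exact child_eq ec excluded_state '<' (sc.1, sc.2 - 1) _ (ih _ (by omega))
        (by rw [pvIchoose_pm _ _ (by omega) (by omega)]; congr 1; omega)
    · -- dv < 0, dh > 0
      rw [pvIchoose_mp _ _ (by omega) (by omega), pvInter_split,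
        if_pos (show (ec.2 - sc.2).natAbs ≠ 0 by omega),
        if_pos (show (ec.1 - sc.1).natAbs ≠ 0 by omega),
        if_neg (show ¬((ec.2 - sc.2).natAbs = 0 ∧ (ec.1 - sc.1).natAbs = 0) by omega),
        dif_neg (show ¬ sc.1 < ec.1 by omega),
        dif_pos (show sc.2 < ec.2 by omega),
        dif_pos (show sc.1 > ec.1 by omega),
        dif_neg (show ¬ sc.2 > ec.2 by omega)]
      simp only [List.append_nil, List.nil_append, List.filter_append, List.map_append]
      rw [pvFilter_surv_map, pvFilter_surv_map]
      simp only [pvDelta_gt, pvDelta_up, add_zero, ← sub_eq_add_neg]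
      congr 1
      · exact child_eq ec excluded_state '>' (sc.1, sc.2 + 1) _ (ih _ (by omega))
          (by rw [pvIchoose_mp _ _ (by omega) (by omega)]; congr 1; omega)
      · exact child_eq ec excluded_state '^' (sc.1 - 1, sc.2) _ (ih _ (by omega))
          (by rw [pvIchoose_mp _ _ (by omega) (by omega)]; congr 1; omega)
    · -- dv < 0, dh = 0
      rw [pvIchoose_mp _ _ (by omega) (by omega), pvInter_split,
        if_neg (show ¬(ec.2 - sc.2).natAbs ≠ 0 by omega),
        if_pos (show (ec.1 - sc.1).natAbs ≠ 0 by omega),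
        if_neg (show ¬((ec.2 - sc.2).natAbs = 0 ∧ (ec.1 - sc.1).natAbs = 0) by omega),
        dif_neg (show ¬ sc.1 < ec.1 by omega),
        dif_neg (show ¬ sc.2 < ec.2 by omega),
        dif_pos (show sc.1 > ec.1 by omega),
        dif_neg (show ¬ sc.2 > ec.2 by omega)]
      simp only [List.append_nil, List.nil_append]
      rw [pvFilter_surv_map]
      simp only [pvDelta_up, add_zero, ← sub_eq_add_neg]
      exact child_eq ec excluded_state '^' (sc.1 - 1, sc.2) _ (ih _ (by omega))
        (by rw [pvIchoose_mp _ _ (by omega) (by omega)]; congr 1; omega)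
    · -- dv < 0, dh < 0
      rw [pvIchoose_mm _ _ (by omega) (by omega), pvInter_split,
        if_pos (show (ec.1 - sc.1).natAbs ≠ 0 by omega),
        if_pos (show (ec.2 - sc.2).natAbs ≠ 0 by omega),
        if_neg (show ¬((ec.1 - sc.1).natAbs = 0 ∧ (ec.2 - sc.2).natAbs = 0) by omega),
        dif_neg (show ¬ sc.1 < ec.1 by omega),
        dif_neg (show ¬ sc.2 < ec.2 by omega),
        dif_pos (show sc.1 > ec.1 by omega),
        dif_pos (show sc.2 > ec.2 by omega)]
      simp only [List.append_nil, List.nil_append, List.filter_append, List.map_append]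
      rw [pvFilter_surv_map, pvFilter_surv_map]
      simp only [pvDelta_up, pvDelta_lt, add_zero, ← sub_eq_add_neg]
      congr 1
      · exact child_eq ec excluded_state '^' (sc.1 - 1, sc.2) _ (ih _ (by omega))
          (by rw [pvIchoose_mm _ _ (by omega) (by omega)]; congr 1; omega)
      · exact child_eq ec excluded_state '<' (sc.1, sc.2 - 1) _ (ih _ (by omega))
          (by rw [pvIchoose_mm _ _ (by omega) (by omega)]; congr 1; omega)

-- ===== VERDICT (by name: the statement is the Claim_ definition above) =====
theorem search_paths_rec_spec : Claim_equal_search_paths_rec := by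
  intro sc ec excluded_state _ _
  unfold Spec_search_paths_rec
  exact spr_main ec excluded_state _ sc le_rfl
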